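-- pv_equiv track=rewrite | github.com/Zhangdajiang/ChainLord | app.py | _extract_siwe_field
-- ===== SOURCE A (Python) =====
-- def _extract_siwe_field(message: str, key: str) -> str:
--     if not message:
--         return ""
--     prefix = f"{key}:"
--     for line in message.splitlines():
--         if line.startswith(prefix):
--             return line[len(prefix):].strip()
--     return ""
-- ===== SOURCE B (Python) =====
-- def _extract_siwe_field(message: str, key: str) -> str:
--     fields = {}
--     for line in message.splitlines():
--         name, sep, value = line.partition(":")
--         if sep:
--             fields.setdefault(name, value.strip())
--     return fields.get(key, "")
-- ===== Notes on version B (the rewrite author's own statement) =====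
-- stated objective: alternative
-- what changed: Replaces the early-exit prefix scan with building a first-occurrence field table (partition each line at its first colon, setdefault) followed by a single dict lookup; Pre_ excludes keys containing ':' (outside the natural domain of SIWE field names) whose prefix key+':' occurs in the message, where A's multi-colon prefix match and B's first-colon table keys legitimately diverge.
-- outside the precondition, e.g. on _extract_siwe_field('a:b: x', 'a:b'): A returns 'x', B returns ''
import Mathlib
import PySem

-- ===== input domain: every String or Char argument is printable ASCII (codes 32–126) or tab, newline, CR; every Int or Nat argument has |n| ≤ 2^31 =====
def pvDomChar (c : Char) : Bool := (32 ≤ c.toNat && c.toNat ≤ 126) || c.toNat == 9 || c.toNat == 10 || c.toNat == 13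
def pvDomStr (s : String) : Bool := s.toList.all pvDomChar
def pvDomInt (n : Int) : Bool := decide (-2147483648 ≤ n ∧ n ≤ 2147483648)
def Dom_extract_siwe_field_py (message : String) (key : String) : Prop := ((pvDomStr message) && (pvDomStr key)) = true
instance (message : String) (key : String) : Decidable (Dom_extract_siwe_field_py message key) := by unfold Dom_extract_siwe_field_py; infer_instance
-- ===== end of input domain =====

-- B builds a first-occurrence field table (partition each line at its first colon, setdefault) and
-- looks the key up once, instead of A's early-exit prefix scan (alternative decomposition, same cost).


-- ===== PORT A =====
-- A's for-loop with early return over message.splitlines()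
def pvALoop (pfx : String) : List String → String
  | [] => ""
  | line :: rest =>
      if PySem.Str.startswith line pfx then
        PySem.Str.strip (PySem.Str.slice line (some (PySem.Str.len pfx : Int)) none)
      else pvALoop pfx rest

def extract_siwe_field_py (message : String) (key : String) : String :=
  if message = "" then ""
  else
    let pfx := key ++ ":"
    pvALoop pfx (PySem.Str.splitlines message)

-- ===== PORT B =====
-- one step of B's loop body: name, sep, value = line.partition(":"); if sep: fields.setdefault(name, value.strip())
-- (partition ported by hand via find: exact, since sep is nonempty iff ':' occurs in line and
--  partition splits at the FIRST ':', the index PySem.Str.find returns)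
def pvBStep (d : PySem.Dict String String) (line : String) : PySem.Dict String String :=
  let i := PySem.Str.find line ":"
  if i = -1 then d
  else d.setdefault (PySem.Str.slice line none (some i))
                    (PySem.Str.strip (PySem.Str.slice line (some (i + 1)) none))

def extract_siwe_field_py_alt (message : String) (key : String) : String :=
  let fields := (PySem.Str.splitlines message).foldl pvBStep PySem.Dict.empty
  fields.getD key ""

-- ===== PRECONDITION & SPEC =====
-- Pre_ excludes keys containing ':' (not a SIWE field name, outside the natural domain) whose
-- prefix `key + ":"` actually occurs in the message: there A's prefix match spans colons while B's
-- first-colon table keys never contain one, so the two defensible readings diverge.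
def Pre_extract_siwe_field_py (message : String) (key : String) : Prop :=
  (':' : Char) ∉ key.toList ∨ PySem.Str.isIn (key ++ ":") message = false
instance (message : String) (key : String) : Decidable (Pre_extract_siwe_field_py message key) := by unfold Pre_extract_siwe_field_py; infer_instance

def pvWitness_extract_siwe_field_py : String × String := ("Issued At: 2024\nURI: x", "URI")

def Spec_extract_siwe_field_py (message : String) (key : String) (out : String) : Prop := out = extract_siwe_field_py_alt message key
instance (message : String) (key : String) (out : String) : Decidable (Spec_extract_siwe_field_py message key out) := by unfold Spec_extract_siwe_field_py; infer_instance

-- ===== CLAIM (what is proved, stated in full; the proofs are below) =====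
def Claim_equal_extract_siwe_field_py : Prop := ∀ (message : String) (key : String), Dom_extract_siwe_field_py message key → Pre_extract_siwe_field_py message key → Spec_extract_siwe_field_py message key (extract_siwe_field_py message key)

-- ===== LEMMAS AND PROOFS =====
-- [c] is a prefix of L.drop j iff L[j] is c
theorem pv_sing_pre (c : Char) (L : List Char) (j : Nat) : [c] <+: L.drop j ↔ L[j]? = some c := by
  constructor
  · rintro ⟨S, hS⟩
    have : (L.drop j)[0]? = some c := by rw [← hS]; simp
    simpa [List.getElem?_drop] using this
  · intro h
    obtain ⟨hlt, hval⟩ := List.getElem?_eq_some_iff.mp h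
    exact ⟨L.drop (j+1), by rw [List.drop_eq_getElem_cons hlt, hval]; rfl⟩

-- if a line starts with K ++ ':' and K is colon-free, the line's FIRST colon sits at index K.length
theorem pv_find_of_start (K L : List Char) (hK : (':':Char) ∉ K)
    (h : (K ++ [':']) <+: L) : PySem.Chars.find L [':'] = (K.length : Int) := by
  have hinf : [(':':Char)] <:+: L := ((List.suffix_append K [':']).isInfix).trans h.isInfix
  have hne : PySem.Chars.find L [':'] ≠ -1 := (PySem.Chars.find_ne_neg_one_iff _ _).mpr hinf
  have h0 : 0 ≤ PySem.Chars.find L [':'] := by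
    have := PySem.Chars.neg_one_le_find L [':']
    omega
  obtain ⟨hpre, hmin⟩ := PySem.Chars.find_spec h0
  set n := (PySem.Chars.find L [':']).toNat with hn
  obtain ⟨R, hR⟩ := h
  have hget : L[K.length]? = some ':' := by
    rw [← hR, List.append_assoc]
    rw [List.getElem?_append_right (by simp)]
    simp
  have hKn : ¬ (K.length < n) := fun hlt =>
    hmin K.length hlt ((pv_sing_pre ':' L K.length).mpr hget)
  have hnK : ¬ (n < K.length) := by
    intro hlt
    have hgn : L[n]? = some ':' := (pv_sing_pre ':' L n).mp hpre
    have : K[n]? = some ':' := by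
      rw [← hR, List.append_assoc, List.getElem?_append_left hlt] at hgn
      exact hgn
    exact hK (List.mem_of_getElem? this)
  omega

-- conversely: if the text before the first colon is K, the line starts with K ++ ':'
theorem pv_start_of_find (K L : List Char) (h0 : 0 ≤ PySem.Chars.find L [':'])
    (htake : L.take (PySem.Chars.find L [':']).toNat = K) :
    (K ++ [':']) <+: L := by
  obtain ⟨hpre, -⟩ := PySem.Chars.find_spec h0
  set n := (PySem.Chars.find L [':']).toNat with hn
  have hget : L[n]? = some ':' := (pv_sing_pre ':' L n).mp hpre
  obtain ⟨hlt, hval⟩ := List.getElem?_eq_some_iff.mp hget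
  refine ⟨L.drop (n+1), ?_⟩
  rw [← htake, List.append_assoc]
  rw [show (([':'] : List Char) ++ L.drop (n+1)) = L.drop n by
    rw [List.drop_eq_getElem_cons hlt, hval]; rfl]
  exact List.take_append_drop n L

-- every piece splitlines yields is an infix of the original string (invariant of go)
theorem pv_go_mem (isB : Char → Bool) (s cur : List Char) (acc : List (List Char))
    (l : List Char) (h : l ∈ PySem.Chars.splitlines.go isB s cur acc) :
    l ∈ acc ∨ (∃ u, u <+: s ∧ l = cur.reverse ++ u) ∨ l <:+: s := by
  induction s, cur, acc using PySem.Chars.splitlines.go.induct isB generalizing l with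
  | case1 cur acc hemp =>
    rw [PySem.Chars.splitlines.go, if_pos hemp] at h
    exact Or.inl (List.mem_reverse.mp h)
  | case2 cur acc hemp =>
    rw [PySem.Chars.splitlines.go, if_neg hemp] at h
    rw [List.mem_reverse] at h
    rcases List.mem_cons.mp h with rfl | h
    · exact Or.inr (Or.inl ⟨[], List.nil_prefix, by simp⟩)
    · exact Or.inl h
  | case3 rest cur acc ih =>
    rw [PySem.Chars.splitlines.go] at h
    rcases ih l h with h | ⟨u, hu, rfl⟩ | h
    · rcases List.mem_cons.mp h with rfl | h
      · exact Or.inr (Or.inl ⟨[], List.nil_prefix, by simp⟩)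
      · exact Or.inl h
    · exact Or.inr (Or.inr (hu.isInfix.trans ⟨['\x0d','\n'], [], by simp⟩))
    · exact Or.inr (Or.inr (h.trans ⟨['\x0d','\n'], [], by simp⟩))
  | case4 c rest cur acc hne hb ih =>
    rw [PySem.Chars.splitlines.go.eq_def] at h
    split at h
    next heq => exact absurd heq (by simp)
    next rest1 heq =>
      obtain ⟨hc, hr⟩ := List.cons_eq_cons.mp heq
      exact (hne rest1 hc hr).elim
    next c' rest' heq =>
      obtain ⟨hc, hr⟩ := List.cons_eq_cons.mp heq
      subst hc; subst hr
      rw [if_pos hb] at h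
      rcases ih l h with h | ⟨u, hu, rfl⟩ | h
      · rcases List.mem_cons.mp h with rfl | h
        · exact Or.inr (Or.inl ⟨[], List.nil_prefix, by simp⟩)
        · exact Or.inl h
      · exact Or.inr (Or.inr (hu.isInfix.trans ⟨[c], [], by simp⟩))
      · exact Or.inr (Or.inr (h.trans ⟨[c], [], by simp⟩))
  | case5 c rest cur acc hne hb ih =>
    rw [PySem.Chars.splitlines.go.eq_def] at h
    split at h
    next heq => exact absurd heq (by simp)
    next rest1 heq =>
      obtain ⟨hc, hr⟩ := List.cons_eq_cons.mp heq
      exact (hne rest1 hc hr).elim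
    next c' rest' heq =>
      obtain ⟨hc, hr⟩ := List.cons_eq_cons.mp heq
      subst hc; subst hr
      rw [if_neg hb] at h
      rcases ih l h with h | ⟨u, hu, rfl⟩ | h
      · exact Or.inl h
      · refine Or.inr (Or.inl ⟨c :: u, ?_, ?_⟩)
        · exact List.cons_prefix_cons.mpr ⟨rfl, hu⟩
        · simp
      · exact Or.inr (Or.inr (h.trans ⟨[c], [], by simp⟩))

theorem pv_splitlines_infix (s l : List Char) (h : l ∈ PySem.Chars.splitlines s) : l <:+: s := by
  rcases pv_go_mem _ s [] [] l h with h | ⟨u, hu, rfl⟩ | h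
  · simp at h
  · simpa using hu.isInfix
  · exact h

-- A returns "" when no line carries the prefix
theorem pv_aloop_none (pfx : String) (ls : List String)
    (h : ∀ line ∈ ls, PySem.Str.startswith line pfx = false) : pvALoop pfx ls = "" := by
  induction ls with
  | nil => rfl
  | cons line rest ih =>
    rw [pvALoop, h line (List.mem_cons_self), if_neg (by simp)]
    exact ih fun l hl => h l (List.mem_cons_of_mem _ hl)

-- if the key contains a colon it can never equal a table key (those stop before the first colon)

-- a key containing ':' never equals a table key (those stop before the line's first colon)
theorem pv_fold_skip (key : String) (hK : (':':Char) ∈ key.toList) (ls : List String) :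
    ∀ d : PySem.Dict String String, (ls.foldl pvBStep d).get? key = d.get? key := by
  induction ls with
  | nil => intro d; rfl
  | cons line ls ih =>
    intro d
    rw [List.foldl_cons, ih]
    unfold pvBStep
    by_cases hi : PySem.Str.find line ":" = -1
    · rw [if_pos hi]
    · rw [if_neg hi]
      have h0 : 0 ≤ PySem.Str.find line ":" := by
        have := PySem.Chars.neg_one_le_find line.toList [':']
        simp only [PySem.Str.find_eq] at hi ⊢
        rw [show (":" : String).toList = [':'] from rfl] at hi ⊢
        omega
      rw [PySem.Dict.get?_setdefault_of_ne]
      intro hcon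
      subst hcon
      -- ':' ∈ (slice line none (some i)).toList = take n line.toList, contradicting find's minimality
      have hfindC : PySem.Chars.find line.toList [':'] = PySem.Str.find line ":" := by
        simp only [PySem.Str.find_eq]; rfl
      obtain ⟨-, hmin⟩ := PySem.Chars.find_spec (s := line.toList) (sub := [':']) (by omega)
      have hname : (PySem.Str.slice line none (some (PySem.Str.find line ":"))).toList
          = line.toList.take (PySem.Str.find line ":").toNat := by
        rw [PySem.Str.toList_slice]
        rw [show PySem.Chars.slice line.toList none (some (PySem.Str.find line ":"))
            = PySem.List.slice line.toList none (some (PySem.Str.find line ":")) from rfl]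
        rw [PySem.List.slice_to _ h0]
      rw [hname] at hK
      obtain ⟨j, hj, hval⟩ := List.getElem_of_mem hK
      have hjn : j < (PySem.Str.find line ":").toNat := lt_of_lt_of_le hj (by simp [List.length_take])
      apply hmin j (by rw [hfindC]; exact hjn)
      rw [pv_sing_pre]
      rw [List.getElem_take] at hval
      have hjl : j < line.toList.length := by
        simp only [List.length_take] at hj
        omega
      rw [List.getElem?_eq_getElem hjl, hval]

-- a line of message that starts with pfx makes pfx a substring of message

-- a line of message starting with pfx makes pfx a substring of message
theorem pv_no_occurrence (pfx message : String) (hocc : PySem.Str.isIn pfx message = false)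
    (line : String) (hline : line ∈ PySem.Str.splitlines message) :
    PySem.Str.startswith line pfx = false := by
  cases hb : PySem.Str.startswith line pfx with
  | false => rfl
  | true =>
    exfalso
    have hp : pfx.toList <+: line.toList := by
      have := (PySem.Chars.startswith_iff line.toList pfx.toList).mp (by simpa using hb)
      exact this
    have hmem : line.toList ∈ PySem.Chars.splitlines message.toList := by
      rw [← PySem.Str.splitlines_map_toList]
      exact List.mem_map_of_mem hline
    have hinf : pfx.toList <:+: message.toList :=
      hp.isInfix.trans (pv_splitlines_infix _ _ hmem)
    rw [(PySem.Str.isIn_iff_infix pfx message).mpr hinf] at hocc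
    exact Bool.true_eq_false.mp hocc


-- the loop invariant: after B's table-building fold, looking up `key` (colon-free) yields the value
-- already stored in d if any, else exactly what A's early-exit scan returns on the remaining lines
theorem pv_fold (key : String) (hK : (':':Char) ∉ key.toList)
    (ls : List String) :
    ∀ d : PySem.Dict String String,
    (ls.foldl pvBStep d).getD key "" = (d.get? key).getD (pvALoop (key ++ ":") ls) := by
  induction ls with
  | nil => intro d; simp [pvALoop, PySem.Dict.getD_eq_get?_getD]
  | cons line ls ih =>
    intro d
    simp only [List.foldl_cons, pvALoop]
    have hKL : (key ++ ":").toList = key.toList ++ [':'] := by simp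
    by_cases hi : PySem.Str.find line ":" = -1
    · have hstart : PySem.Str.startswith line (key ++ ":") = false := by
        by_contra h
        have h' : PySem.Str.startswith line (key ++ ":") = true := by
          cases hb : PySem.Str.startswith line (key ++ ":") with
          | false => exact absurd hb h
          | true => rfl
        have hp : (key.toList ++ [':']) <+: line.toList := by
          have := (PySem.Chars.startswith_iff line.toList (key ++ ":").toList).mp (by simpa using h')
          rwa [hKL] at this
        have := pv_find_of_start key.toList line.toList hK hp
        simp only [PySem.Str.find_eq] at hi
        rw [show (":" : String).toList = [':'] from rfl] at hi
        omega
      rw [hstart]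
      simp only [pvBStep, hi, if_true]
      exact ih d
    · have h0 : 0 ≤ PySem.Str.find line ":" := by
        have := PySem.Chars.neg_one_le_find line.toList [':']
        simp only [PySem.Str.find_eq] at hi ⊢
        rw [show (":" : String).toList = [':'] from rfl] at hi ⊢
        omega
      set i := PySem.Str.find line ":" with hidef
      set n := i.toNat with hndef
      have hfindC : PySem.Chars.find line.toList [':'] = i := by
        simp only [hidef, PySem.Str.find_eq]; rfl
      have hnlen : n ≤ line.toList.length := by
        have := PySem.Chars.find_le_length line.toList [':']
        omega
      have hname : (PySem.Str.slice line none (some i)).toList = line.toList.take n := by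
        rw [PySem.Str.toList_slice]
        rw [show PySem.Chars.slice line.toList none (some i) = PySem.List.slice line.toList none (some i) from rfl]
        rw [PySem.List.slice_to _ h0]
      simp only [pvBStep, hi, if_false, ← hidef]
      by_cases hkey : PySem.Str.slice line none (some i) = key
      · -- the first-colon key IS `key`: A matches this line and both values coincide
        have htake : line.toList.take n = key.toList := by rw [← hname, hkey]
        have hstartP : (key.toList ++ [':']) <+: line.toList := by
          apply pv_start_of_find
          · rw [hfindC]; exact h0
          · rw [hfindC]; exact htake
        have hstart : PySem.Str.startswith line (key ++ ":") = true := by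
          simp only [PySem.Str.startswith_eq]
          rw [hKL] at *
          exact (PySem.Chars.startswith_iff _ _).mpr hstartP
        have hlen : (PySem.Str.len (key ++ ":") : Int) = i + 1 := by
          have hiK : i = (key.toList.length : Int) := by
            rw [← hfindC]
            exact pv_find_of_start key.toList line.toList hK hstartP
          simp only [PySem.Str.len_eq, hKL, List.length_append, List.length_singleton]
          push_cast
          omega
        rw [hstart, if_pos rfl, hkey, hlen, ih, PySem.Dict.get?_setdefault_self,
          Option.getD_some]
      · have hstart : PySem.Str.startswith line (key ++ ":") = false := by
          by_contra h
          have h' : PySem.Str.startswith line (key ++ ":") = true := by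
            cases hb : PySem.Str.startswith line (key ++ ":") with
            | false => exact absurd hb h
            | true => rfl
          have hp : (key.toList ++ [':']) <+: line.toList := by
            have := (PySem.Chars.startswith_iff line.toList (key ++ ":").toList).mp (by simpa using h')
            rwa [hKL] at this
          have hiK := pv_find_of_start key.toList line.toList hK hp
          rw [hfindC] at hiK
          have : line.toList.take n = key.toList := by
            obtain ⟨R, hR⟩ := hp
            rw [← hR]
            have : n = key.toList.length := by omega
            rw [this, List.append_assoc, List.take_append_of_le_length (le_refl _), List.take_length]
          apply hkey
          apply String.toList_inj.mp
          rw [hname, this]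
        rw [hstart, if_neg (by simp), ih, PySem.Dict.get?_setdefault_of_ne]
        exact fun hcon => hkey hcon.symm

-- ===== VERDICT (by name: the statement is the Claim_ definition above) =====
theorem extract_siwe_field_py_spec : Claim_equal_extract_siwe_field_py := by
  intro message key _ hpre
  unfold Spec_extract_siwe_field_py extract_siwe_field_py extract_siwe_field_py_alt
  by_cases h : message = ""
  · subst h
    rw [if_pos rfl, show PySem.Str.splitlines "" = [] from rfl]
    rfl
  · rw [if_neg h]
    by_cases hK : (':' : Char) ∈ key.toList
    · have hocc : PySem.Str.isIn (key ++ ":") message = false := by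
        rcases hpre with h1 | h2
        · exact absurd hK h1
        · exact h2
      rw [pv_aloop_none _ _ (fun l hl => pv_no_occurrence _ _ hocc l hl)]
      rw [PySem.Dict.getD_eq_get?_getD, pv_fold_skip key hK, PySem.Dict.get?_empty]
      rfl
    · rw [pv_fold key hK, PySem.Dict.get?_empty, Option.getD_none]
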